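-- pv_equiv track=rewrite | github.com/viplavdodeja/VIP_Twin | core/twin_service.py | _evidence_to_text
-- ===== SOURCE A (Python) =====
-- def _evidence_to_text(evidence_items, max_chars):
--     if evidence_items is None or len(evidence_items) == 0:
--         return ""
--     lines = []
--     total = 0
--     i = 0
--     while i < len(evidence_items):
--         item = evidence_items[i]
--         snippet = item.get("snippet", "")
--         source = item.get("source", "")
--         why = item.get("why", "")
--         block = []
--         block.append("- Snippet: " + snippet)
--         block.append("  Source: " + source)
--         block.append("  Why: " + why)
--         text = "\n".join(block)
--         if total + len(text) + 1 > max_chars: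
--             break
--         lines.append(text)
--         total += len(text) + 1
--         i += 1
--     return "\n".join(lines)
-- ===== SOURCE B (Python) =====
-- def _evidence_to_text(evidence_items, max_chars):
--     if evidence_items is None or len(evidence_items) == 0:
--         return ""
--     blocks = [
--         "- Snippet: " + it.get("snippet", "")
--         + "\n  Source: " + it.get("source", "")
--         + "\n  Why: " + it.get("why", "")
--         for it in evidence_items
--     ]
--     total = 0
--     cums = [(total := total + len(b) + 1) for b in blocks]
--     kept = sum(1 for c in cums if c <= max_chars)
--     return "\n".join(blocks[:kept])
-- ===== Notes on version B (the rewrite author's own statement) =====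
-- stated objective: alternative
-- what changed: B maps all items to formatted blocks up front, builds the running prefix sums of (len(block)+1), counts how many cumulative sums stay within max_chars (valid because the sums are strictly increasing) and joins that prefix, replacing A's stateful index while-loop with break.
import Mathlib
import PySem

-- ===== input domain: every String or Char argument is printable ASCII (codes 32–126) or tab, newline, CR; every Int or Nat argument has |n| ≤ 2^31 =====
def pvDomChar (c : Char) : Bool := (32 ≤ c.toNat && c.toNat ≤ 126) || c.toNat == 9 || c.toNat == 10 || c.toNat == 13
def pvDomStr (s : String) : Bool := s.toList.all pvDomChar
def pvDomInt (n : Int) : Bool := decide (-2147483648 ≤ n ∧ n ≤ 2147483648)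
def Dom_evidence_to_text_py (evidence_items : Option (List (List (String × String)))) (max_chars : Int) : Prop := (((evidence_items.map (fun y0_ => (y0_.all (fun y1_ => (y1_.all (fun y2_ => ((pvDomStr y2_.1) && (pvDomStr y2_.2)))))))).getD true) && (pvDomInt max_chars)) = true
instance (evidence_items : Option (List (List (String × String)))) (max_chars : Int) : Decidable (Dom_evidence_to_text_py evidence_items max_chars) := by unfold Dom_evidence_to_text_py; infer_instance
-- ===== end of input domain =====

-- B replaces A's stateful index while-loop (break on overflow) with map-to-blocks + prefix sums + count-and-take (alternative decomposition, same cost).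

-- ===== PORT A =====
-- A's while-loop: index i, accumulated lines, running total, break on overflow
def pvALoop (items : List (List (String × String))) (max_chars : Int) (i : Nat) (lines : List String) (total : Int) : List String :=
  if h : i < items.length then
    let item := items[i]
    let snippet := (PySem.Dict.mk item).getD "snippet" ""
    let source := (PySem.Dict.mk item).getD "source" ""
    let why := (PySem.Dict.mk item).getD "why" ""
    let block := ["- Snippet: " ++ snippet, "  Source: " ++ source, "  Why: " ++ why]
    let text := PySem.Str.join "\n" block
    if total + PySem.Str.len text + 1 > max_chars then lines
    else pvALoop items max_chars (i + 1) (lines ++ [text]) (total + PySem.Str.len text + 1)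
  else lines
termination_by items.length - i

def evidence_to_text_py (evidence_items : Option (List (List (String × String)))) (max_chars : Int) : String :=
  match evidence_items with
  | none => ""
  | some items =>
    if items.length == 0 then ""
    else PySem.Str.join "\n" (pvALoop items max_chars 0 [] 0)

-- ===== PORT B =====
def pvBBlock (it : List (String × String)) : String :=
  "- Snippet: " ++ (PySem.Dict.mk it).getD "snippet" ""
    ++ "\n  Source: " ++ (PySem.Dict.mk it).getD "source" ""
    ++ "\n  Why: " ++ (PySem.Dict.mk it).getD "why" ""

-- the running prefix sums built by Source B's walrus comprehension
def pvScan : List Int → Int → List Int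
  | [], _ => []
  | x :: xs, t => (t + x) :: pvScan xs (t + x)

def evidence_to_text_py_alt (evidence_items : Option (List (List (String × String)))) (max_chars : Int) : String :=
  match evidence_items with
  | none => ""
  | some items =>
    if items.length == 0 then ""
    else
      let blocks := items.map pvBBlock
      let cums := pvScan (blocks.map (fun b => PySem.Str.len b + 1)) 0
      let kept := List.countP (fun c => decide (c ≤ max_chars)) cums
      PySem.Str.join "\n" (blocks.take kept)

-- ===== PRECONDITION & SPEC =====
def Spec_evidence_to_text_py (evidence_items : Option (List (List (String × String)))) (max_chars : Int) (out : String) : Prop := out = evidence_to_text_py_alt evidence_items max_chars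
instance (evidence_items : Option (List (List (String × String)))) (max_chars : Int) (out : String) : Decidable (Spec_evidence_to_text_py evidence_items max_chars out) := by unfold Spec_evidence_to_text_py; infer_instance

-- ===== CLAIM (what is proved, stated in full; the proofs are below) =====
def Claim_equal_evidence_to_text_py : Prop := ∀ (evidence_items : Option (List (List (String × String)))) (max_chars : Int), Dom_evidence_to_text_py evidence_items max_chars → Spec_evidence_to_text_py evidence_items max_chars (evidence_to_text_py evidence_items max_chars)

-- ===== LEMMAS AND PROOFS =====

-- A's per-item "\n".join of three lines equals B's single concatenation
theorem pvText_eq (item : List (String × String)) :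
    PySem.Str.join "\n" ["- Snippet: " ++ (PySem.Dict.mk item).getD "snippet" "",
      "  Source: " ++ (PySem.Dict.mk item).getD "source" "",
      "  Why: " ++ (PySem.Dict.mk item).getD "why" ""] = pvBBlock item := by
  apply String.ext
  simp [PySem.Str.toList_join, PySem.Chars.join, List.intercalate, pvBBlock]

-- the prefix kept by A's loop, as a recursion over blocks
def pvKeep (m : Int) : List String → Int → List String
  | [], _ => []
  | b :: bs, t => if t + PySem.Str.len b + 1 > m then [] else b :: pvKeep m bs (t + PySem.Str.len b + 1)

theorem pvALoop_eq (items : List (List (String × String))) (m : Int) :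
    ∀ i lines total, pvALoop items m i lines total
      = lines ++ pvKeep m ((items.drop i).map pvBBlock) total := by
  have key : ∀ n i lines total, items.length - i ≤ n →
      pvALoop items m i lines total = lines ++ pvKeep m ((items.drop i).map pvBBlock) total := by
    intro n
    induction n with
    | zero =>
      intro i lines total hle
      have h : ¬ i < items.length := by omega
      rw [pvALoop]
      simp [h, List.drop_eq_nil_of_le (by omega : items.length ≤ i), pvKeep]
    | succ n ih =>
      intro i lines total hle
      rw [pvALoop]
      by_cases h : i < items.length
      · simp only [h, dif_pos]
        rw [pvText_eq]
        rw [List.drop_eq_getElem_cons h]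
        simp only [List.map_cons, pvKeep]
        rw [ih (i+1) (lines ++ [pvBBlock items[i]]) (total + PySem.Str.len (pvBBlock items[i]) + 1) (by omega)]
        simp only [List.map_drop]
        split_ifs <;> simp
      · simp [h, List.drop_eq_nil_of_le (by omega : items.length ≤ i), pvKeep]
  intro i lines total
  exact key (items.length - i) i lines total le_rfl

theorem pvLen_nonneg (s : String) : 0 ≤ PySem.Str.len s := by
  simp [PySem.Str.len]

-- once the running total exceeds m, no later cumulative sum (of increments ≥ 1) is ≤ m
theorem pvScan_none (m : Int) : ∀ (xs : List Int) (t : Int), (∀ x ∈ xs, 1 ≤ x) → m < t →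
    List.countP (fun c => decide (c ≤ m)) (pvScan xs t) = 0 := by
  intro xs
  induction xs with
  | nil => intro t _ _; simp [pvScan]
  | cons x xs ih =>
    intro t hpos hm
    have hx : 1 ≤ x := hpos x (by simp)
    rw [pvScan, List.countP_cons]
    rw [ih (t + x) (fun y hy => hpos y (by simp [hy])) (by omega)]
    simp
    omega

-- B's count-and-take over strictly increasing prefix sums equals A's break-style prefix
theorem pvTake_count (m : Int) : ∀ (bs : List String) (t : Int),
    bs.take (List.countP (fun c => decide (c ≤ m)) (pvScan (bs.map (fun b => PySem.Str.len b + 1)) t))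
      = pvKeep m bs t := by
  intro bs
  induction bs with
  | nil => intro t; simp [pvScan, pvKeep]
  | cons b bs ih =>
    intro t
    rw [List.map_cons, pvScan, List.countP_cons, pvKeep]
    by_cases hc : t + PySem.Str.len b + 1 > m
    · have h0 : List.countP (fun c => decide (c ≤ m)) (pvScan (bs.map (fun b => PySem.Str.len b + 1)) (t + (PySem.Str.len b + 1))) = 0 := by
        apply pvScan_none
        · intro x hx
          simp only [List.mem_map] at hx
          obtain ⟨y, _, rfl⟩ := hx
          have := pvLen_nonneg y
          omega
        · omega
      have hd : (decide (t + (PySem.Str.len b + 1) ≤ m)) = false := by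
        simp only [decide_eq_false_iff_not]
        omega
      rw [h0, hd, if_pos hc]
      rfl
    · have hd : (decide (t + (PySem.Str.len b + 1) ≤ m)) = true := by
        simp only [decide_eq_true_eq]
        omega
      rw [hd, if_neg hc]
      have h1 : (if (true : Bool) = true then 1 else 0) = 1 := rfl
      rw [h1, List.take_succ_cons, ih (t + (PySem.Str.len b + 1)), add_assoc]

-- ===== VERDICT (by name: the statement is the Claim_ definition above) =====
theorem evidence_to_text_py_spec : Claim_equal_evidence_to_text_py := by
  intro evidence_items max_chars _
  unfold Spec_evidence_to_text_py evidence_to_text_py evidence_to_text_py_alt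
  cases evidence_items with
  | none => rfl
  | some items =>
    by_cases h : items.length == 0
    · simp [h]
    · simp only [h]
      rw [pvALoop_eq items max_chars 0 [] 0, pvTake_count max_chars (items.map pvBBlock) 0]
      simp
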